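-- pv_equiv track=rewrite | github.com/garciparedes/python-examples | competitive/hacker_rank/algorithms/strings/two_characters.py | check_correct
-- ===== SOURCE A (Python) =====
-- def check_correct(r):
--     l = len(r)
--     correct = True
--     k = 1
--     while k < l:
--         if r[k - 1] == r[k]:
--             correct = False
--         k += 1
--     return correct
-- ===== SOURCE B (Python) =====
-- def check_correct(r):
--     # Collapse r into maximal runs of equal consecutive characters,
--     # then the string is "correct" iff every run has length exactly 1.
--     runs = []  # list of (char, run_length)
--     for c in r:
--         if runs and runs[-1][0] == c:
--             runs[-1] = (runs[-1][0], runs[-1][1] + 1)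
--         else:
--             runs.append((c, 1))
--     return all(n == 1 for _, n in runs)
-- ===== Notes on version B (the rewrite author's own statement) =====
-- stated objective: alternative
-- what changed: B collapses the string into maximal runs of equal consecutive characters in one accumulating pass and then checks every run has length 1, instead of A's index-pointer while loop comparing r[k-1] with r[k].
import Mathlib
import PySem

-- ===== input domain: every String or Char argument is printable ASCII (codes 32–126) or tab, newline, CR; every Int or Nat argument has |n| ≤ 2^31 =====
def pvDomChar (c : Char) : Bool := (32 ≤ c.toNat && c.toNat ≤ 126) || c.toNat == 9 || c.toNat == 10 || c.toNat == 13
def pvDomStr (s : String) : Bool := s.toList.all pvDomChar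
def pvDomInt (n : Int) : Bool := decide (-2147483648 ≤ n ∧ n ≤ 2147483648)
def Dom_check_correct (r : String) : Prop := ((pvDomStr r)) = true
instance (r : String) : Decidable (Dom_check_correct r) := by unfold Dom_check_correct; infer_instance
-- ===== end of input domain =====

-- B collapses the string into maximal runs of equal consecutive characters and checks
-- every run has length 1; A scans with an index pointer comparing r[k-1] to r[k].

-- ===== PORT A =====
-- the while loop: k counts up while k < l, flipping `correct` on an equal adjacent pair
def pvALoop (r : String) (l : Int) (correct : Bool) (k : Int) : Bool :=
  if k < l then
    pvALoop r l
      (if PySem.Str.pyGet? r (k - 1) == PySem.Str.pyGet? r k then false else correct)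
      (k + 1)
  else correct
termination_by (l - k).toNat
decreasing_by omega

def check_correct (r : String) : Bool :=
  pvALoop r (PySem.Str.len r) true 1

-- ===== PORT B =====
-- one step of B's accumulation: extend the last run or start a new one
def pvStep (runs : List (Char × Nat)) (c : Char) : List (Char × Nat) :=
  match runs.getLast? with
  | some (b, n) => if b == c then runs.dropLast ++ [(b, n + 1)] else runs ++ [(c, 1)]
  | none => runs ++ [(c, 1)]

def check_correct_alt (r : String) : Bool :=
  (r.toList.foldl pvStep []).all (fun p => p.2 == 1)

-- ===== PRECONDITION & SPEC =====
def Spec_check_correct (r : String) (out : Bool) : Prop := out = check_correct_alt r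
instance (r : String) (out : Bool) : Decidable (Spec_check_correct r out) := by unfold Spec_check_correct; infer_instance

-- ===== CLAIM (what is proved, stated in full; the proofs are below) =====
def Claim_equal_check_correct : Prop := ∀ (r : String), Dom_check_correct r → Spec_check_correct r (check_correct r)

-- ===== LEMMAS AND PROOFS =====

-- "no two adjacent characters are equal": the common characterisation of both ports
def pvNoAdj : List Char → Bool
  | a :: b :: t => (a != b) && pvNoAdj (b :: t)
  | _ => true

-- ----- A side -----
theorem pvALoop_eq (r : String) (c : Bool) (k : Nat) (hk : 1 ≤ k) :
    pvALoop r (r.toList.length : Int) c (k : Int)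
      = (c && pvNoAdj (r.toList.drop (k - 1))) := by
  by_cases h : k < r.toList.length
  · have hdrop0 : r.toList.drop k = r.toList[k] :: r.toList.drop (k + 1) :=
      (List.getElem_cons_drop (h := h)).symm
    have hdrop1 : r.toList.drop (k - 1) = r.toList[k - 1] :: r.toList.drop k := by
      have := (List.getElem_cons_drop (h := (by omega : k - 1 < r.toList.length))).symm
      rw [show k - 1 + 1 = k from by omega] at this
      exact this
    have h1 : PySem.Str.pyGet? r ((k : Int) - 1) = some (r.toList[k - 1]) := by
      rw [show ((k : Int) - 1) = ((k - 1 : Nat) : Int) from by omega]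
      simp [List.getElem?_eq_getElem (by omega : k - 1 < r.toList.length)]
    have h2 : PySem.Str.pyGet? r (k : Int) = some (r.toList[k]) := by
      simp [List.getElem?_eq_getElem h]
    have hrec := pvALoop_eq r
      (if PySem.Str.pyGet? r ((k : Int) - 1) == PySem.Str.pyGet? r (k : Int) then false else c)
      (k + 1) (by omega)
    rw [show ((k : Nat) + 1 : Nat) = ((k : Int) + 1).toNat from by omega] at hrec
    rw [show (((k : Int) + 1).toNat : Int) = (k : Int) + 1 from by omega] at hrec
    rw [pvALoop, if_pos (by exact_mod_cast h), hrec]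
    rw [show ((k : Int) + 1).toNat - 1 = k from by omega]
    rw [h1, h2, hdrop1]
    rw [show pvNoAdj (r.toList[k - 1] :: r.toList.drop k)
        = ((r.toList[k - 1] != r.toList[k]) && pvNoAdj (r.toList.drop k)) from by
      rw [hdrop0]; rw [pvNoAdj, ← hdrop0]]
    by_cases he : r.toList[k - 1] = r.toList[k]
    · simp [he]
    · have hf : (r.toList[k - 1] == r.toList[k]) = false := beq_eq_false_iff_ne.mpr he
      simp [bne, hf]
  · rw [pvALoop, if_neg (by exact_mod_cast h)]
    have hna : pvNoAdj (r.toList.drop (k - 1)) = true := by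
      have hlen : (r.toList.drop (k - 1)).length ≤ 1 := by
        rw [List.length_drop]; omega
      rcases hl : r.toList.drop (k - 1) with _ | ⟨a, _ | _⟩
      · rfl
      · rfl
      · rw [hl] at hlen; simp at hlen
    simp [hna]
termination_by r.toList.length - k
decreasing_by omega

-- ----- B side -----
-- what the tail of the fold contributes once the last run is (b, n)
def pvTail (b : Char) (n : Nat) : List Char → Bool
  | [] => n == 1
  | c :: cs => if b == c then pvTail b (n + 1) cs else (n == 1) && pvTail c 1 cs

theorem pvFoldl_eq (cs : List Char) (R : List (Char × Nat)) (b : Char) (n : Nat) :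
    (cs.foldl pvStep (R ++ [(b, n)])).all (fun p => p.2 == 1)
      = (R.all (fun p => p.2 == 1) && pvTail b n cs) := by
  induction cs generalizing R b n with
  | nil => simp [pvTail]
  | cons c cs ih =>
    rw [List.foldl_cons]
    rw [show pvStep (R ++ [(b, n)]) c
        = if b == c then R ++ [(b, n + 1)] else (R ++ [(b, n)]) ++ [(c, 1)] from by
      simp [pvStep]]
    by_cases h : b = c
    · simp only [h, BEq.rfl, if_true, ih, pvTail, BEq.rfl, if_true]
    · rw [if_neg (by simp [h]), ih, pvTail, if_neg (by simp [h])]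
      simp [Bool.and_assoc]

theorem pvTail_ne_one (b : Char) (n : Nat) (hn : 2 ≤ n) (cs : List Char) :
    pvTail b n cs = false := by
  induction cs generalizing b n with
  | nil => simp [pvTail]; omega
  | cons c cs ih =>
    rw [pvTail]
    by_cases h : b = c
    · simp [h, ih c (n + 1) (by omega)]
    · simp [h]; omega

theorem pvTail_one (b : Char) (cs : List Char) :
    pvTail b 1 cs = pvNoAdj (b :: cs) := by
  induction cs generalizing b with
  | nil => rfl
  | cons c cs ih =>
    rw [pvTail, pvNoAdj]
    by_cases h : b = c
    · simp [h, pvTail_ne_one c 2 le_rfl]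
    · simp [h, bne, ih]

theorem pvAlt_eq (r : String) : check_correct_alt r = pvNoAdj r.toList := by
  rw [check_correct_alt]
  rcases h : r.toList with _ | ⟨c, t⟩
  · rfl
  · rw [List.foldl_cons]
    rw [show pvStep [] c = [] ++ [(c, 1)] from rfl]
    rw [pvFoldl_eq, pvTail_one]
    rfl

-- ===== VERDICT (by name: the statement is the Claim_ definition above) =====
theorem check_correct_spec : Claim_equal_check_correct := by
  intro r _
  unfold Spec_check_correct check_correct
  rw [pvAlt_eq]
  rw [show PySem.Str.len r = (r.toList.length : Int) from by simp]
  rw [show (1 : Int) = ((1 : Nat) : Int) from rfl]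
  rw [pvALoop_eq r true 1 le_rfl]
  simp
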